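-- pv_equiv track=rewrite | github.com/TBot709/advent-of-code-2023 | test.py | getHasCycle
-- ===== SOURCE A (Python) =====
-- def getHasCycle(hashList: list[int], minCycleLength: int) -> bool:
--     hashSet = set()
--     for i in range(len(hashList)):
--         if hashList[i] in hashSet:
--             if i - hashList.index(hashList[i]) >= minCycleLength:
--                 return True
--         else:
--             hashSet.add(hashList[i])
--     return False
-- ===== SOURCE B (Python) =====
-- def getHasCycle(hashList: list[int], minCycleLength: int) -> bool:
--     # Build complete first/last occurrence index tables in one pass,
--     # then scan the table: a repeated value's maximal span is last - first.
--     first = {}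
--     last = {}
--     for i, v in enumerate(hashList):
--         if v not in first:
--             first[v] = i
--         last[v] = i
--     return any(last[v] - first[v] >= minCycleLength
--                for v in first if last[v] > first[v])
-- ===== Notes on version B (the rewrite author's own statement) =====
-- stated objective: faster
-- what changed: Instead of A's single scan with early return and a repeated hashList.index() inner scan, B builds complete first- and last-occurrence index tables in one pass and then, in a separate pass over the table, checks whether any repeated value has last-first span >= minCycleLength.
import Mathlib
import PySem

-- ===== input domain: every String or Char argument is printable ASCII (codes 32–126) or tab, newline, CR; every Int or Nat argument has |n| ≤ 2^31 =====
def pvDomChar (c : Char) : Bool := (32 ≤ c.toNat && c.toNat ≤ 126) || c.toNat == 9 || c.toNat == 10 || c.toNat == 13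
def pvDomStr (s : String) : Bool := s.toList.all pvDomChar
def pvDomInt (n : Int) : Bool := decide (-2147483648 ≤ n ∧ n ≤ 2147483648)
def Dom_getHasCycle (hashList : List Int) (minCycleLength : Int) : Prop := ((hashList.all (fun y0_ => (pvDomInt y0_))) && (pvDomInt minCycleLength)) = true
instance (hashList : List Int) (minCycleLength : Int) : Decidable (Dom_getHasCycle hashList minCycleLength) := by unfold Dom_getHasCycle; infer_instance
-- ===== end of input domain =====

-- B replaces A's repeated hashList.index() inner scan with complete first/last occurrence index
-- tables built in one pass, then a separate scan of the table (a repeated value's maximal span is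
-- last-first); objective: faster (measured).

-- ===== PORT A =====
-- the 'for i in range(len(hashList))' loop with early return, state = hashSet
def getHasCycleLoop (hashList : List Int) (minCycleLength : Int) (i : Nat) (hashSet : PySem.Set Int) : Bool :=
  if h : i < hashList.length then
    if PySem.Set.contains hashSet hashList[i] then
      if minCycleLength ≤ (i : Int) - (((PySem.List.index? hashList hashList[i]).getD 0 : Nat) : Int) then
        true  -- 'return True'
      else getHasCycleLoop hashList minCycleLength (i + 1) hashSet
    else getHasCycleLoop hashList minCycleLength (i + 1) (PySem.Set.add hashSet hashList[i])
  else false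
termination_by hashList.length - i

def getHasCycle (hashList : List Int) (minCycleLength : Int) : Bool :=
  getHasCycleLoop hashList minCycleLength 0 PySem.Set.empty

-- ===== PORT B =====
def getHasCycle_alt (hashList : List Int) (minCycleLength : Int) : Bool :=
  -- one pass: dict of first occurrence (set only if absent) and dict of last occurrence (overwrite)
  let fl := (PySem.List.enumerate hashList 0).foldl
    (fun (fl : PySem.Dict Int Int × PySem.Dict Int Int) p =>
      (if fl.1.contains p.2 then fl.1 else fl.1.insert p.2 p.1, fl.2.insert p.2 p.1))
    (PySem.Dict.empty, PySem.Dict.empty)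
  -- separate pass over the table: any repeated value with span ≥ minCycleLength
  fl.1.keys.any (fun v =>
    decide (fl.1.getD v 0 < fl.2.getD v 0) &&
    decide (minCycleLength ≤ fl.2.getD v 0 - fl.1.getD v 0))

-- ===== PRECONDITION & SPEC =====
def Spec_getHasCycle (hashList : List Int) (minCycleLength : Int) (out : Bool) : Prop := out = getHasCycle_alt hashList minCycleLength
instance (hashList : List Int) (minCycleLength : Int) (out : Bool) : Decidable (Spec_getHasCycle hashList minCycleLength out) := by unfold Spec_getHasCycle; infer_instance

-- ===== CLAIM (what is proved, stated in full; the proofs are below) =====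
def Claim_equal_getHasCycle : Prop := ∀ (hashList : List Int) (minCycleLength : Int), Dom_getHasCycle hashList minCycleLength → Spec_getHasCycle hashList minCycleLength (getHasCycle hashList minCycleLength)

-- ===== LEMMAS AND PROOFS =====

-- the common characterisation: some index j holds a value already seen,
-- at distance ≥ minCycleLength from its first occurrence
def HasSpan (xs : List Int) (m : Int) : Prop :=
  ∃ j : Nat, j < xs.length ∧ ∃ fi : Nat,
    PySem.List.index? xs (xs.getD j 0) = some fi ∧ fi < j ∧ m ≤ (j : Int) - (fi : Int)

-- membership in a prefix, phrased through the first-occurrence index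
theorem mem_take_index? (xs : List Int) (x : Int) (i : Nat) :
    x ∈ xs.take i ↔ ∃ fi, PySem.List.index? xs x = some fi ∧ fi < i := by
  constructor
  · intro h
    have hx : x ∈ xs := List.mem_of_mem_take h
    obtain ⟨fi, hfi⟩ := Option.isSome_iff_exists.mp ((PySem.List.index?_isSome_iff xs x).mpr hx)
    obtain ⟨hk, hget, hmin⟩ := PySem.List.getElem_of_index?_eq_some hfi
    obtain ⟨k, hk', hkx⟩ := List.mem_iff_getElem.mp h
    have hki : k < i := by have := hk'; simp [List.length_take] at this; omega
    have hkn : k < xs.length := by have := hk'; simp [List.length_take] at this; omega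
    have hxk : xs[k]'hkn = x := by rw [← List.getElem_take (h := hk')]; exact hkx
    refine ⟨fi, hfi, ?_⟩
    by_contra hle
    exact hmin k (by omega) hxk
  · rintro ⟨fi, hfi, hlt⟩
    obtain ⟨hk, hget, -⟩ := PySem.List.getElem_of_index?_eq_some hfi
    exact List.mem_iff_getElem.mpr ⟨fi, by simp [List.length_take]; omega,
      by rw [List.getElem_take]; exact hget⟩

theorem loopA_char (xs : List Int) (m : Int) :
    ∀ (fuel i : Nat), xs.length ≤ i + fuel →
    (getHasCycleLoop xs m i (PySem.Set.ofList (xs.take i)) = true ↔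
    (∃ j : Nat, j < xs.length ∧ i ≤ j ∧ ∃ fi : Nat,
      PySem.List.index? xs (xs.getD j 0) = some fi ∧ fi < j ∧ m ≤ (j : Int) - (fi : Int))) := by
  intro fuel
  induction fuel with
  | zero =>
    intro i hfi
    rw [getHasCycleLoop, dif_neg (by omega)]
    simp only [Bool.false_eq_true, false_iff]
    rintro ⟨j, hjn, hij, -⟩; omega
  | succ fuel ih =>
    intro i hfi
    by_cases hi : i < xs.length
    · rw [getHasCycleLoop, dif_pos hi]
      have hcont : PySem.Set.contains (PySem.Set.ofList (xs.take i)) xs[i]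
          = decide (xs[i] ∈ xs.take i) := by
        simp [PySem.Set.contains, PySem.Set.mem_ofList]
      have htake : xs.take (i + 1) = xs.take i ++ [xs[i]] := by
        rw [List.take_add_one]; simp [List.getElem?_eq_getElem hi]
      have hofl : PySem.Set.ofList (xs.take (i + 1))
          = PySem.Set.add (PySem.Set.ofList (xs.take i)) xs[i] := by
        rw [htake, PySem.Set.ofList_eq_foldl, PySem.Set.ofList_eq_foldl, List.foldl_append]
        rfl
      by_cases hmem : xs[i] ∈ xs.take i
      · obtain ⟨fi, hfi', hlt⟩ := (mem_take_index? xs xs[i] i).mp hmem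
        rw [hcont]
        simp only [hmem, decide_true, if_true]
        rw [hfi']
        by_cases hcond : m ≤ (i : Int) - (fi : Int)
        · rw [if_pos (by simpa using hcond)]
          simp only [true_iff]
          exact ⟨i, hi, le_refl i, fi, by rwa [List.getD_eq_getElem _ _ hi], hlt, hcond⟩
        · rw [if_neg (by simpa using hcond)]
          have hset : PySem.Set.add (PySem.Set.ofList (xs.take i)) xs[i]
              = PySem.Set.ofList (xs.take i) := by
            simp [PySem.Set.add, PySem.Set.contains, PySem.Set.mem_ofList, hmem]
          rw [show PySem.Set.ofList (xs.take i)
              = PySem.Set.ofList (xs.take (i + 1)) by rw [hofl, hset]]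
          rw [ih (i + 1) (by omega)]
          constructor
          · rintro ⟨j, hjn, hij, rest⟩; exact ⟨j, hjn, by omega, rest⟩
          · rintro ⟨j, hjn, hij, fj, hfj, hlt', hc⟩
            refine ⟨j, hjn, ?_, fj, hfj, hlt', hc⟩
            rcases Nat.eq_or_lt_of_le hij with heq | h; swap; · omega
            exfalso
            rw [← heq, List.getD_eq_getElem _ _ hi, hfi'] at hfj
            have : fi = fj := by injection hfj
            subst this; rw [← heq] at hc; exact hcond hc
      · rw [hcont]
        simp only [hmem, decide_false, Bool.false_eq_true, if_false]
        rw [← hofl, ih (i + 1) (by omega)]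
        constructor
        · rintro ⟨j, hjn, hij, rest⟩; exact ⟨j, hjn, by omega, rest⟩
        · rintro ⟨j, hjn, hij, fj, hfj, hlt', hc⟩
          refine ⟨j, hjn, ?_, fj, hfj, hlt', hc⟩
          rcases Nat.eq_or_lt_of_le hij with heq | h; swap; · omega
          exfalso
          rw [← heq, List.getD_eq_getElem _ _ hi] at hfj
          exact hmem ((mem_take_index? xs xs[i] i).mpr ⟨fj, hfj, by omega⟩)
    · rw [getHasCycleLoop, dif_neg hi]
      simp only [Bool.false_eq_true, false_iff]
      rintro ⟨j, hjn, hij, -⟩; omega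

theorem A_iff_hasSpan (xs : List Int) (m : Int) :
    getHasCycle xs m = true ↔ HasSpan xs m := by
  have h := loopA_char xs m xs.length 0 (by omega)
  simp only [List.take_zero] at h
  rw [getHasCycle, show PySem.Set.empty = PySem.Set.ofList ([] : List Int) from rfl, h]
  unfold HasSpan
  constructor
  · rintro ⟨j, hjn, -, rest⟩; exact ⟨j, hjn, rest⟩
  · rintro ⟨j, hjn, rest⟩; exact ⟨j, hjn, Nat.zero_le j, rest⟩

-- ===== B-side: the two index tables built by the single pass =====

def firstD (xs : List Int) : PySem.Dict Int Int :=
  (PySem.List.enumerate xs 0).foldl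
    (fun d p => if d.contains p.2 then d else d.insert p.2 p.1) PySem.Dict.empty

def lastD (xs : List Int) : PySem.Dict Int Int :=
  (PySem.List.enumerate xs 0).foldl (fun d p => d.insert p.2 p.1) PySem.Dict.empty

theorem alt_eq (xs : List Int) (m : Int) :
    getHasCycle_alt xs m = (firstD xs).keys.any (fun v =>
      decide ((firstD xs).getD v 0 < (lastD xs).getD v 0) &&
      decide (m ≤ (lastD xs).getD v 0 - (firstD xs).getD v 0)) := by
  have hpair := PySem.List.foldl_prod_mk
    (fun (d : PySem.Dict Int Int) (p : Int × Int) =>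
      if d.contains p.2 then d else d.insert p.2 p.1)
    (fun (d : PySem.Dict Int Int) (p : Int × Int) => d.insert p.2 p.1)
    (PySem.List.enumerate xs 0) PySem.Dict.empty PySem.Dict.empty
  simp only [getHasCycle_alt, firstD, lastD, hpair]
  rfl

theorem index?_isSome_decide (xs : List Int) (v : Int) :
    ((PySem.List.index? xs v).map (fun n => (n : Int))).isSome = decide (v ∈ xs) := by
  by_cases hv : v ∈ xs
  · obtain ⟨k, hk⟩ := Option.isSome_iff_exists.mp ((PySem.List.index?_isSome_iff xs v).mpr hv)
    rw [hk]; simp [hv]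
  · rw [(PySem.List.index?_eq_none_iff xs v).mpr hv]; simp [hv]

theorem firstD_get? (xs : List Int) :
    ∀ v, (firstD xs).get? v = (PySem.List.index? xs v).map (fun n => (n : Int)) := by
  induction xs using List.reverseRecOn with
  | nil =>
    intro v
    simp [firstD, PySem.List.enumerate_nil, PySem.Dict.get?_empty, PySem.List.index?_eq_idxOf?]
  | append_singleton xs x ih =>
    have hstep : firstD (xs ++ [x])
        = if (firstD xs).contains x then firstD xs else (firstD xs).insert x xs.length := by
      unfold firstD
      rw [PySem.List.enumerate_append, List.foldl_append]
      simp [PySem.List.enumerate_cons, PySem.List.enumerate_nil]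
    have hcontains : (firstD xs).contains x = decide (x ∈ xs) := by
      rw [PySem.Dict.contains_eq_isSome_get?, ih x, index?_isSome_decide]
    intro v
    by_cases hx : x ∈ xs
    · rw [hstep, hcontains]
      simp only [hx, decide_true, if_true]
      rw [ih v]
      by_cases hv : v ∈ xs
      · rw [PySem.List.index?_append_of_mem _ hv]
      · have hvx : v ≠ x := fun h => hv (h ▸ hx)
        have h1 : PySem.List.index? xs v = none := (PySem.List.index?_eq_none_iff xs v).mpr hv
        have h2 : PySem.List.index? (xs ++ [x]) v = none :=
          (PySem.List.index?_eq_none_iff _ v).mpr (by simp [hv, hvx])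
        rw [h1, h2]
    · rw [hstep, hcontains]
      simp only [hx, decide_false, Bool.false_eq_true, if_false]
      rw [PySem.Dict.get?_insert]
      by_cases hvx : v = x
      · subst hvx
        rw [if_pos rfl, PySem.List.index?_append_singleton_self _ _ hx]
        rfl
      · rw [if_neg hvx, ih v]
        by_cases hv : v ∈ xs
        · rw [PySem.List.index?_append_of_mem _ hv]
        · have h1 : PySem.List.index? xs v = none := (PySem.List.index?_eq_none_iff xs v).mpr hv
          have h2 : PySem.List.index? (xs ++ [x]) v = none :=
            (PySem.List.index?_eq_none_iff _ v).mpr (by simp [hv, hvx])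
          rw [h1, h2]

theorem lastD_get? (xs : List Int) :
    ∀ v, (lastD xs).get? v
      = (PySem.List.index? xs.reverse v).map (fun k => ((xs.length - 1 - k : Nat) : Int)) := by
  induction xs using List.reverseRecOn with
  | nil =>
    intro v
    simp [lastD, PySem.List.enumerate_nil, PySem.Dict.get?_empty, PySem.List.index?_eq_idxOf?]
  | append_singleton xs x ih =>
    have hstep : lastD (xs ++ [x]) = (lastD xs).insert x (xs.length : Int) := by
      unfold lastD
      rw [PySem.List.enumerate_append, List.foldl_append]
      simp [PySem.List.enumerate_cons, PySem.List.enumerate_nil]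
    intro v
    rw [hstep, PySem.Dict.get?_insert]
    have hrev : (xs ++ [x]).reverse = x :: xs.reverse := by simp
    by_cases hvx : v = x
    · subst hvx
      rw [if_pos rfl, hrev, PySem.List.index?_cons_self]
      simp
    · rw [if_neg hvx, hrev, PySem.List.index?_cons_of_ne xs.reverse (fun h => hvx h.symm), ih v]
      cases hidx : PySem.List.index? xs.reverse v with
      | none => simp
      | some k =>
        simp only [Option.map_some]
        congr 1
        have hk : k < xs.length := by
          obtain ⟨hk', -, -⟩ := PySem.List.getElem_of_index?_eq_some hidx
          simpa using hk'
        simp only [List.length_append, List.length_singleton]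
        omega

theorem lastIdx_spec (xs : List Int) (v : Int) (k : Nat)
    (h : PySem.List.index? xs.reverse v = some k) :
    xs.length - 1 - k < xs.length ∧ xs.getD (xs.length - 1 - k) 0 = v ∧
    ∀ j, j < xs.length → xs.getD j 0 = v → j ≤ xs.length - 1 - k := by
  obtain ⟨hk, hget, hmin⟩ := PySem.List.getElem_of_index?_eq_some h
  have hkn : k < xs.length := by simpa using hk
  rw [List.getElem_reverse] at hget
  refine ⟨by omega, ?_, ?_⟩
  · rw [List.getD_eq_getElem _ _ (by omega)]
    exact hget
  · intro j hj hjv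
    by_contra hgt
    have hj' : xs.length - 1 - j < k := by omega
    have hrl : xs.length - 1 - j < xs.reverse.length := by simp; omega
    have hji : xs.length - 1 - (xs.length - 1 - j) = j := by omega
    have hrg : xs.reverse[xs.length - 1 - j]'hrl = v := by
      rw [List.getElem_reverse, ← List.getD_eq_getElem _ 0 (by omega)]
      simp only [hji]
      exact hjv
    exact hmin _ hj' hrg

theorem B_iff_hasSpan (xs : List Int) (m : Int) :
    getHasCycle_alt xs m = true ↔ HasSpan xs m := by
  rw [alt_eq]
  simp only [List.any_eq_true, Bool.and_eq_true, decide_eq_true_eq]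
  unfold HasSpan
  have hmemkeys : ∀ v, v ∈ (firstD xs).keys ↔ v ∈ xs := by
    intro v
    rw [← PySem.Dict.contains_iff_mem_keys, PySem.Dict.contains_eq_isSome_get?, firstD_get?,
      index?_isSome_decide]
    simp
  constructor
  · rintro ⟨v, hvk, hlt, hspan⟩
    have hv : v ∈ xs := (hmemkeys v).mp hvk
    obtain ⟨fi, hfi⟩ := Option.isSome_iff_exists.mp ((PySem.List.index?_isSome_iff xs v).mpr hv)
    obtain ⟨k, hk⟩ := Option.isSome_iff_exists.mp
      ((PySem.List.index?_isSome_iff xs.reverse v).mpr (by simpa using hv))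
    have hF : (firstD xs).getD v 0 = (fi : Int) := by
      rw [PySem.Dict.getD_eq_get?_getD, firstD_get?, hfi]; rfl
    have hL : (lastD xs).getD v 0 = ((xs.length - 1 - k : Nat) : Int) := by
      rw [PySem.Dict.getD_eq_get?_getD, lastD_get?, hk]; rfl
    rw [hF, hL] at hlt hspan
    obtain ⟨hjn, hgd, -⟩ := lastIdx_spec xs v k hk
    refine ⟨xs.length - 1 - k, hjn, fi, by rw [hgd]; exact hfi, by omega, by omega⟩
  · rintro ⟨j, hjn, fi, hfi, hlt, hc⟩
    set v := xs.getD j 0 with hvdef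
    have hjv : xs[j]'hjn = v := by rw [hvdef, List.getD_eq_getElem _ _ hjn]
    have hv : v ∈ xs := hjv ▸ List.getElem_mem hjn
    obtain ⟨k, hk⟩ := Option.isSome_iff_exists.mp
      ((PySem.List.index?_isSome_iff xs.reverse v).mpr (by simpa using hv))
    have hF : (firstD xs).getD v 0 = (fi : Int) := by
      rw [PySem.Dict.getD_eq_get?_getD, firstD_get?, hfi]; rfl
    have hL : (lastD xs).getD v 0 = ((xs.length - 1 - k : Nat) : Int) := by
      rw [PySem.Dict.getD_eq_get?_getD, lastD_get?, hk]; rfl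
    obtain ⟨-, -, hmax⟩ := lastIdx_spec xs v k hk
    have hjle : j ≤ xs.length - 1 - k := hmax j hjn rfl
    exact ⟨v, (hmemkeys v).mpr hv, by rw [hF, hL]; omega,
      by rw [hF, hL]; omega⟩

-- ===== VERDICT (by name: the statement is the Claim_ definition above) =====
theorem getHasCycle_spec : Claim_equal_getHasCycle := by
  intro xs m _
  unfold Spec_getHasCycle
  rw [Bool.eq_iff_iff, A_iff_hasSpan, B_iff_hasSpan]
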